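-- pv_equiv track=rewrite | github.com/shimame/LeetCode | PaizaTraining/level_up_workbook/rankA/A_rank_level_up_menu/rankA_distorted_reversi_game/step7.py | change_diagonal_mark
-- ===== SOURCE A (Python) =====
-- def change_diagonal_mark(y, x, S_map, H, W, d):
--     if d == "L":
--         step = -1
--     else:
--         step = 1
--     val_y = 1
--     val_x = step
--     up_flag = True
--     down_flag = True
--
--     while 0 <= x + val_x < W:
--         # 上側
--         if y + val_y < H and S_map[y+val_y][x+val_x] != "." and up_flag:
--             up_flag = False
--             if S_map[y+val_y][x+val_x] == "*":
--                 count_y = 1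
--                 count_x = step
--                 while count_y < val_y:
--                     S_map[y+count_y][x+count_x] = "*"
--                     count_y += 1
--                     count_x += step
--         # 下側
--         if 0 <= y - val_y and S_map[y-val_y][x+val_x] != "." and down_flag:
--             down_flag = False
--             if S_map[y-val_y][x+val_x] == "*":
--                 count_y = 1
--                 count_x = step
--                 while count_y < val_y:
--                     S_map[y-count_y][x+count_x] = "*"
--                     count_y += 1
--                     count_x += step
--         val_y += 1
--         val_x += step
--     return S_map
-- ===== SOURCE B (Python) =====
-- def change_diagonal_mark(y, x, S_map, H, W, d):
--     step = -1 if d == "L" else 1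
--     for dy in (1, -1):
--         v = 1
--         while 0 <= x + v * step < W and (y + v < H if dy == 1 else y - v >= 0):
--             c = S_map[y + dy * v][x + v * step]
--             if c != ".":
--                 if c == "*":
--                     for k in range(1, v):
--                         S_map[y + dy * k][x + k * step] = "*"
--                 break
--             v += 1
--     return S_map
-- ===== Notes on version B (the rewrite author's own statement) =====
-- stated objective: simpler
-- what changed: A's single flag-guarded loop that walks both diagonal directions in lockstep (with up/down booleans and duplicated inner fill loops) is replaced by two independent scan-to-first-blocker passes, one per direction, each breaking at the first non-'.' cell and filling the strictly-between cells with a range loop.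
import Mathlib
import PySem

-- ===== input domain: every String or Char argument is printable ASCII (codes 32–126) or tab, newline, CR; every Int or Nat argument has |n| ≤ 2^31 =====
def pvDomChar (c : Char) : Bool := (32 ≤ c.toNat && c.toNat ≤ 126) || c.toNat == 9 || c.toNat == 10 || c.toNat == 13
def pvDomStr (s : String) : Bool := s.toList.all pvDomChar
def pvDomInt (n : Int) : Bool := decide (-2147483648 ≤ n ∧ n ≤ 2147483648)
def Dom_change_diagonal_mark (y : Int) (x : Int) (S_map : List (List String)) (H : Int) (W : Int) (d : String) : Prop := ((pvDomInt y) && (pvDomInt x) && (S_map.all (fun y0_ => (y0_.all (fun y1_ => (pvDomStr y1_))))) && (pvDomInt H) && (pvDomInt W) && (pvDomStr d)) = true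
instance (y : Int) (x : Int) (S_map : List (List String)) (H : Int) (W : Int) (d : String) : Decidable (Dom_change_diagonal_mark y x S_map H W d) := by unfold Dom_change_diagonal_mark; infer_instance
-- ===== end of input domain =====

-- B replaces A's single flag-guarded diagonal walk (two directions interleaved in one loop)
-- by two independent scan-to-first-blocker passes (up, then down), each breaking at the first
-- non-'.' cell and filling the strictly-between cells; objective: simpler.  Both Pythons
-- mutate S_map in place and return it; the equivalence proved here is about the return value.

-- board cell read/write (all accesses admitted by Pre_ have nonnegative in-range indices,
-- where Python's indexing is plain 0-based indexing; exact there)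
def pvGet2 (b : List (List String)) (i j : Int) : String :=
  (b.getD i.toNat []).getD j.toNat ""

def pvSet2 (b : List (List String)) (i j : Int) (s : String) : List (List String) :=
  b.set i.toNat ((b.getD i.toNat []).set j.toNat s)

-- ===== PORT A =====
-- A's inner fill loop 'while count_y < val_y' (sgn = +1 for the upper side, -1 for the lower side)
def fillA (b : List (List String)) (y x step sgn count_y count_x val_y : Int) : List (List String) :=
  if _h : count_y < val_y then
    fillA (pvSet2 b (y + sgn * count_y) (x + count_x) "*") y x step sgn (count_y + 1) (count_x + step) val_y
  else b
termination_by (val_y - count_y).toNat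
decreasing_by omega

-- A's outer 'while 0 <= x + val_x < W' loop with the two flags (fuel only guards totality;
-- W.toNat + 1 checks of the condition always suffice, since val_x moves by ±1 each pass)
def loopA (fuel : Nat) (y x H W step : Int) (b : List (List String)) (val_y val_x : Int) (up down : Bool) : List (List String) :=
  match fuel with
  | 0 => b
  | fuel + 1 =>
    if 0 ≤ x + val_x ∧ x + val_x < W then
      let b1 := if y + val_y < H ∧ pvGet2 b (y + val_y) (x + val_x) ≠ "." ∧ up = true then
          (if pvGet2 b (y + val_y) (x + val_x) = "*" then fillA b y x step 1 1 step val_y else b)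
        else b
      let up1 := if y + val_y < H ∧ pvGet2 b (y + val_y) (x + val_x) ≠ "." ∧ up = true then false else up
      let b2 := if 0 ≤ y - val_y ∧ pvGet2 b1 (y - val_y) (x + val_x) ≠ "." ∧ down = true then
          (if pvGet2 b1 (y - val_y) (x + val_x) = "*" then fillA b1 y x step (-1) 1 step val_y else b1)
        else b1
      let down1 := if 0 ≤ y - val_y ∧ pvGet2 b1 (y - val_y) (x + val_x) ≠ "." ∧ down = true then false else down
      loopA fuel y x H W step b2 (val_y + 1) (val_x + step) up1 down1
    else b

def change_diagonal_mark (y : Int) (x : Int) (S_map : List (List String)) (H : Int) (W : Int) (d : String) : List (List String) :=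
  let step : Int := if d = "L" then -1 else 1
  loopA (W.toNat + 1) y x H W step S_map 1 step true true

-- ===== PORT B =====
-- B's fill 'for k in range(1, v): S_map[y+dy*k][x+k*step] = "*"'
def fillB (y x step dy : Int) (b : List (List String)) (ks : List Int) : List (List String) :=
  ks.foldl (fun bb k => pvSet2 bb (y + dy * k) (x + k * step) "*") b

-- B's scan for one direction dy: walk the diagonal to the first non-'.' cell, fill, break
def scanB (fuel : Nat) (y x H W step dy : Int) (b : List (List String)) (v : Int) : List (List String) :=
  match fuel with
  | 0 => b
  | fuel + 1 =>
    if (0 ≤ x + v * step ∧ x + v * step < W) ∧ (if dy = 1 then y + v < H else 0 ≤ y - v) then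
      if pvGet2 b (y + dy * v) (x + v * step) ≠ "." then
        if pvGet2 b (y + dy * v) (x + v * step) = "*" then fillB y x step dy b (PySem.List.pyRange 1 v 1) else b
      else scanB fuel y x H W step dy b (v + 1)
    else b

def change_diagonal_mark_alt (y : Int) (x : Int) (S_map : List (List String)) (H : Int) (W : Int) (d : String) : List (List String) :=
  let step : Int := if d = "L" then -1 else 1
  [(1 : Int), -1].foldl (fun bb dy => scanB (W.toNat + 1) y x H W step dy bb 1) S_map

-- ===== PRECONDITION & SPEC =====
-- Pre_ admits (i) the natural domain of the function (an H×W board with the mark on it),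
-- and also every input on which A's loop body can touch no cell at all: (ii) the column
-- condition already fails at the first step, or (iii) both row guards are dead from the
-- start.  Outside Pre_ Python's reads either raise IndexError (H or W exceeding the actual
-- list sizes) or use negative-index wraparound (y < 0 or y ≥ H), which both programs share
-- but the ports do not model.
def Pre_change_diagonal_mark (y : Int) (x : Int) (S_map : List (List String)) (H : Int) (W : Int) (d : String) : Prop :=
  (0 ≤ y ∧ y < H ∧ H ≤ (S_map.length : Int) ∧ ∀ row ∈ S_map, W ≤ (row.length : Int))
  ∨ ¬(0 ≤ x + (if d = "L" then -1 else 1) ∧ x + (if d = "L" then -1 else 1) < W)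
  ∨ (H ≤ y + 1 ∧ y ≤ 0)

instance (y : Int) (x : Int) (S_map : List (List String)) (H : Int) (W : Int) (d : String) : Decidable (Pre_change_diagonal_mark y x S_map H W d) := by unfold Pre_change_diagonal_mark; infer_instance

def pvWitness_change_diagonal_mark : Int × Int × List (List String) × Int × Int × String :=
  (1, 0, [["*", "."], [".", "."], ["*", "."]], 3, 2, "R")

def Spec_change_diagonal_mark (y : Int) (x : Int) (S_map : List (List String)) (H : Int) (W : Int) (d : String) (out : List (List String)) : Prop := out = change_diagonal_mark_alt y x S_map H W d
instance (y : Int) (x : Int) (S_map : List (List String)) (H : Int) (W : Int) (d : String) (out : List (List String)) : Decidable (Spec_change_diagonal_mark y x S_map H W d out) := by unfold Spec_change_diagonal_mark; infer_instance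

-- ===== CLAIM (what is proved, stated in full; the proofs are below) =====
def Claim_equal_change_diagonal_mark : Prop := ∀ (y : Int) (x : Int) (S_map : List (List String)) (H : Int) (W : Int) (d : String), Dom_change_diagonal_mark y x S_map H W d → Pre_change_diagonal_mark y x S_map H W d → Spec_change_diagonal_mark y x S_map H W d (change_diagonal_mark y x S_map H W d)

-- ===== LEMMAS AND PROOFS =====

theorem pv_get2_set2_ne (b : List (List String)) (r c r' c' : Int) (s : String)
    (h : r.toNat ≠ r'.toNat) : pvGet2 (pvSet2 b r c s) r' c' = pvGet2 b r' c' := by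
  simp [pvGet2, pvSet2, List.getD, List.getElem?_set_ne h]

theorem pv_set2_comm (b : List (List String)) (r c r' c' : Int) (s s' : String)
    (h : r.toNat ≠ r'.toNat) :
    pvSet2 (pvSet2 b r c s) r' c' s' = pvSet2 (pvSet2 b r' c' s') r c s := by
  simp [pvSet2, List.getD, List.getElem?_set_ne h, List.getElem?_set_ne (Ne.symm h)]
  exact List.set_comm _ _ h


theorem pv_get2_fillB_ne (y x step dy : Int) (r c : Int) (ks : List Int) (b : List (List String))
    (h : ∀ k ∈ ks, (y + dy * k).toNat ≠ r.toNat) :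
    pvGet2 (fillB y x step dy b ks) r c = pvGet2 b r c := by
  induction ks generalizing b with
  | nil => rfl
  | cons k ks ih =>
      simp only [fillB, List.foldl_cons] at *
      rw [ih _ (fun k hk => h k (List.mem_cons_of_mem _ hk)),
        pv_get2_set2_ne _ _ _ _ _ _ (h k (List.mem_cons_self))]

theorem pv_fillB_set2_comm (y x step dy : Int) (r c : Int) (s : String) (ks : List Int) (b : List (List String))
    (h : ∀ k ∈ ks, (y + dy * k).toNat ≠ r.toNat) :
    fillB y x step dy (pvSet2 b r c s) ks = pvSet2 (fillB y x step dy b ks) r c s := by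
  induction ks generalizing b with
  | nil => rfl
  | cons k ks ih =>
      simp only [fillB, List.foldl_cons] at *
      rw [pv_set2_comm _ _ _ _ _ _ _ (Ne.symm (h k (List.mem_cons_self))),
        ih _ (fun k hk => h k (List.mem_cons_of_mem _ hk))]

theorem pv_fillA_eq_fillB (y x step sgn val : Int) :
    ∀ cnt b, fillA b y x step sgn cnt (cnt * step) val = fillB y x step sgn b (PySem.List.pyRange cnt val 1) := by
  intro cnt b
  by_cases h : cnt < val
  · rw [fillA, dif_pos h, PySem.List.pyRange_one_cons h]
    have e : cnt * step + step = (cnt + 1) * step := by ring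
    rw [e, pv_fillA_eq_fillB y x step sgn val (cnt + 1)]
    rfl
  · rw [fillA, dif_neg h, PySem.List.pyRange_one_eq_nil (by omega)]
    rfl
termination_by cnt => (val - cnt).toNat
decreasing_by omega


theorem pv_scanB_up_stop (f : Nat) (y x H W step : Int) (b : List (List String)) (v : Int)
    (h : H ≤ y + v) : scanB f y x H W step 1 b v = b := by
  cases f with
  | zero => rfl
  | succ f =>
      rw [scanB]
      simp only [reduceIte]
      rw [if_neg (by omega)]

theorem pv_scanB_down_stop (f : Nat) (y x H W step : Int) (b : List (List String)) (v : Int)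
    (h : y - v < 0) : scanB f y x H W step (-1) b v = b := by
  cases f with
  | zero => rfl
  | succ f =>
      rw [scanB]
      simp only [if_neg (show ¬((-1:Int) = 1) from by decide)]
      rw [if_neg (by omega)]

-- an up scan never touches a row strictly below y (rows ≥ 0)
theorem pv_scanB_up_get_below (y x H W step : Int) (r c : Int) (hr0 : 0 ≤ r) (hr : r < y) :
    ∀ f v b, 1 ≤ v → pvGet2 (scanB f y x H W step 1 b v) r c = pvGet2 b r c := by
  intro f
  induction f with
  | zero => intro v b _; rfl
  | succ f ih =>
      intro v b hv
      rw [scanB]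
      simp only [reduceIte]
      by_cases h1 : (0 ≤ x + v * step ∧ x + v * step < W) ∧ y + v < H
      · rw [if_pos h1]
        by_cases h2 : pvGet2 b (y + 1 * v) (x + v * step) ≠ "."
        · rw [if_pos h2]
          by_cases h3 : pvGet2 b (y + 1 * v) (x + v * step) = "*"
          · rw [if_pos h3]
            apply pv_get2_fillB_ne
            intro k hk
            rw [PySem.List.mem_pyRange_one] at hk
            omega
          · rw [if_neg h3]
        · rw [if_neg h2]
          exact ih (v + 1) b (by omega)
      · rw [if_neg h1]

-- an up scan commutes with writing any cell in a row strictly below y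
theorem pv_scanB_up_set2_comm (y x H W step : Int) (r c : Int) (s : String) (hr0 : 0 ≤ r) (hr : r < y) :
    ∀ f v b, 1 ≤ v → scanB f y x H W step 1 (pvSet2 b r c s) v = pvSet2 (scanB f y x H W step 1 b v) r c s := by
  intro f
  induction f with
  | zero => intro v b _; rfl
  | succ f ih =>
      intro v b hv
      rw [scanB, scanB]
      simp only [reduceIte]
      rw [pv_get2_set2_ne _ _ _ _ _ _ (by omega : r.toNat ≠ (y + 1 * v).toNat)]
      by_cases h1 : (0 ≤ x + v * step ∧ x + v * step < W) ∧ y + v < H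
      · rw [if_pos h1, if_pos h1]
        by_cases h2 : pvGet2 b (y + 1 * v) (x + v * step) ≠ "."
        · rw [if_pos h2, if_pos h2]
          by_cases h3 : pvGet2 b (y + 1 * v) (x + v * step) = "*"
          · rw [if_pos h3, if_pos h3]
            apply pv_fillB_set2_comm
            intro k hk
            rw [PySem.List.mem_pyRange_one] at hk
            omega
          · rw [if_neg h3, if_neg h3]
        · rw [if_neg h2, if_neg h2]
          exact ih (v + 1) b (by omega)
      · rw [if_neg h1, if_neg h1]

-- hence it commutes with a whole lower-side fill
theorem pv_scanB_up_fillB_comm (y x H W step : Int) (ks : List Int) (hk : ∀ k ∈ ks, 1 ≤ k ∧ 0 ≤ y - k) :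
    ∀ f v b, 1 ≤ v →
      scanB f y x H W step 1 (fillB y x step (-1) b ks) v
        = fillB y x step (-1) (scanB f y x H W step 1 b v) ks := by
  induction ks with
  | nil => intro f v b _; rfl
  | cons k ks ih =>
      intro f v b hv
      have hk1 := hk k (List.mem_cons_self)
      show scanB f y x H W step 1 (fillB y x step (-1) (pvSet2 b (y + -1 * k) (x + k * step) "*") ks) v
        = fillB y x step (-1) (pvSet2 (scanB f y x H W step 1 b v) (y + -1 * k) (x + k * step) "*") ks
      rw [ih (fun k hkm => hk k (List.mem_cons_of_mem _ hkm)) f v _ hv,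
        pv_scanB_up_set2_comm y x H W step _ _ _ (by omega) (by omega) f v b hv]


theorem pv_loopA_ff (y x H W step : Int) :
    ∀ f v vx b, loopA f y x H W step b v vx false false = b := by
  intro f
  induction f with
  | zero => intro v vx b; rfl
  | succ f ih =>
      intro v vx b
      simp only [loopA, Bool.false_eq_true, and_false, if_false]
      split
      · exact ih (v + 1) (vx + step) b
      · rfl

theorem pv_loopA_up_dead (y x H W step : Int) :
    ∀ f v vx b d, H ≤ y + v →
      loopA f y x H W step b v vx true d = loopA f y x H W step b v vx false d := by
  intro f
  induction f with
  | zero => intros; rfl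
  | succ f ih =>
      intro v vx b d h
      simp only [loopA, eq_false (show ¬(y + v < H) from by omega), false_and, if_false,
        Bool.false_eq_true, and_false]
      split
      · exact ih (v + 1) (vx + step) _ _ (by omega)
      · rfl

theorem pv_loopA_down_dead (y x H W step : Int) :
    ∀ f v vx b u, y - v < 0 →
      loopA f y x H W step b v vx u true = loopA f y x H W step b v vx u false := by
  intro f
  induction f with
  | zero => intros; rfl
  | succ f ih =>
      intro v vx b u h
      simp only [loopA, eq_false (show ¬(0 ≤ y - v) from by omega), false_and, if_false,
        Bool.false_eq_true, and_false]
      split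
      · exact ih (v + 1) (vx + step) _ _ (by omega)
      · rfl

theorem pv_loopA_tf (y x H W step : Int) :
    ∀ f v b, loopA f y x H W step b v (v * step) true false = scanB f y x H W step 1 b v := by
  intro f
  induction f with
  | zero => intros; rfl
  | succ f ih =>
      intro v b
      rw [scanB]
      simp only [reduceIte, one_mul]
      by_cases hc : 0 ≤ x + v * step ∧ x + v * step < W
      · by_cases hH : y + v < H
        · by_cases hne : pvGet2 b (y + v) (x + v * step) ≠ "."
          · simp only [loopA, if_pos hc, and_true, Bool.false_eq_true,
              and_false, if_false,
              if_pos (⟨hH, hne⟩ : y + v < H ∧ pvGet2 b (y + v) (x + v * step) ≠ ".")]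
            rw [if_pos (And.intro hc hH), if_pos hne, pv_loopA_ff]
            by_cases hstar : pvGet2 b (y + v) (x + v * step) = "*"
            · rw [if_pos hstar, if_pos hstar]
              have e := pv_fillA_eq_fillB y x step 1 v 1 b
              rw [one_mul] at e
              exact e
            · rw [if_neg hstar, if_neg hstar]
          · simp only [loopA, if_pos hc, and_true, Bool.false_eq_true,
              and_false, if_false,
              if_neg (show ¬(y + v < H ∧ pvGet2 b (y + v) (x + v * step) ≠ ".")
                from fun h => hne h.2)]
            rw [if_pos (And.intro hc hH), if_neg hne]
            have e : v * step + step = (v + 1) * step := by ring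
            rw [e]
            exact ih (v + 1) b
        · simp only [loopA, if_pos hc, eq_false hH, false_and, if_false,
            Bool.false_eq_true, and_false]
          have e : v * step + step = (v + 1) * step := by ring
          rw [e, pv_loopA_up_dead y x H W step f (v + 1) ((v + 1) * step) b false (by omega),
            pv_loopA_ff]
      · simp only [loopA, if_neg hc]
        rw [if_neg (fun h => hc h.1)]

theorem pv_loopA_ft (y x H W step : Int) :
    ∀ f v b, loopA f y x H W step b v (v * step) false true = scanB f y x H W step (-1) b v := by
  intro f
  induction f with
  | zero => intros; rfl
  | succ f ih =>
      intro v b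
      rw [scanB]
      simp only [if_neg (show ¬((-1:Int) = 1) from by decide), neg_one_mul]
      by_cases hc : 0 ≤ x + v * step ∧ x + v * step < W
      · have hyv : y - v = y + -v := by ring
        by_cases hD : 0 ≤ y + -v
        · by_cases hne : pvGet2 b (y + -v) (x + v * step) ≠ "."
          · simp only [loopA, if_pos hc, and_true, Bool.false_eq_true,
              and_false, if_false, hyv,
              if_pos (⟨hD, hne⟩ : 0 ≤ y + -v ∧ pvGet2 b (y + -v) (x + v * step) ≠ ".")]
            rw [if_pos (And.intro hc hD), if_pos hne, pv_loopA_ff]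
            by_cases hstar : pvGet2 b (y + -v) (x + v * step) = "*"
            · rw [if_pos hstar, if_pos hstar]
              have e := pv_fillA_eq_fillB y x step (-1) v 1 b
              rw [one_mul] at e
              exact e
            · rw [if_neg hstar, if_neg hstar]
          · simp only [loopA, if_pos hc, and_true, Bool.false_eq_true,
              and_false, if_false, hyv,
              if_neg (show ¬(0 ≤ y + -v ∧ pvGet2 b (y + -v) (x + v * step) ≠ ".")
                from fun h => hne h.2)]
            rw [if_pos (And.intro hc hD), if_neg hne]
            have e : v * step + step = (v + 1) * step := by ring
            rw [e]
            exact ih (v + 1) b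
        · simp only [loopA, if_pos hc, Bool.false_eq_true, and_false, if_false, hyv,
            eq_false hD, false_and]
          have e : v * step + step = (v + 1) * step := by ring
          rw [e, pv_loopA_down_dead y x H W step f (v + 1) ((v + 1) * step) b false (by omega),
            pv_loopA_ff]
      · simp only [loopA, if_neg hc]
        rw [if_neg (fun h => hc h.1)]


theorem pv_loopA_main (y x H W step : Int) (hy : 0 ≤ y) :
    ∀ f v b, 1 ≤ v →
      loopA f y x H W step b v (v * step) true true
        = scanB f y x H W step (-1) (scanB f y x H W step 1 b v) v := by
  intro f
  induction f with
  | zero => intros; rfl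
  | succ f ih =>
      intro v b hv
      have hneg1 : ¬((-1:Int) = 1) := by decide
      have hyv : y + -v = y - v := by ring
      have e : v * step + step = (v + 1) * step := by ring
      by_cases hc : 0 ≤ x + v * step ∧ x + v * step < W
      case neg =>
        have hU : scanB (f+1) y x H W step 1 b v = b := by
          rw [scanB]; simp only [reduceIte]; rw [if_neg (fun h => hc h.1)]
        rw [hU, scanB]
        simp only [if_neg hneg1]
        rw [if_neg (fun h => hc h.1)]
        simp only [loopA, if_neg hc]
      case pos =>
      by_cases hH : y + v < H
      case neg =>
        have hU : scanB (f+1) y x H W step 1 b v = b := by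
          rw [scanB]; simp only [reduceIte]; rw [if_neg (fun h => hH h.2)]
        rw [hU]
        by_cases hD0 : 0 ≤ y - v
        · by_cases hcD : pvGet2 b (y - v) (x + v * step) ≠ "."
          · simp only [loopA, if_pos hc, eq_false hH, false_and, if_false, and_true,
              if_pos (⟨hD0, hcD⟩ : 0 ≤ y - v ∧ pvGet2 b (y - v) (x + v * step) ≠ ".")]
            rw [e, pv_loopA_up_dead y x H W step f (v+1) ((v+1)*step) _ _ (by omega),
              pv_loopA_ff, scanB]
            simp only [if_neg hneg1, neg_one_mul, hyv]
            rw [if_pos (And.intro hc hD0), if_pos hcD]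
            by_cases hstar : pvGet2 b (y - v) (x + v * step) = "*"
            · rw [if_pos hstar, if_pos hstar]
              have e2 := pv_fillA_eq_fillB y x step (-1) v 1 b
              rw [one_mul] at e2
              exact e2
            · rw [if_neg hstar, if_neg hstar]
          · simp only [loopA, if_pos hc, eq_false hH, false_and, if_false, and_true,
              if_neg (show ¬(0 ≤ y - v ∧ pvGet2 b (y - v) (x + v * step) ≠ ".")
                from fun h => hcD h.2)]
            rw [e, ih (v+1) b (by omega), pv_scanB_up_stop f y x H W step b (v+1) (by omega),
              scanB]
            simp only [if_neg hneg1, neg_one_mul, hyv]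
            rw [if_pos (And.intro hc hD0), if_neg hcD]
        · simp only [loopA, if_pos hc, eq_false hH, false_and, if_false, and_true,
            eq_false hD0]
          rw [e, ih (v+1) b (by omega), pv_scanB_up_stop f y x H W step b (v+1) (by omega),
            pv_scanB_down_stop f y x H W step b (v+1) (by omega), scanB]
          simp only [if_neg hneg1, neg_one_mul, hyv]
          rw [if_neg (fun h => hD0 h.2)]
      case pos =>
      by_cases hcU : pvGet2 b (y + v) (x + v * step) ≠ "."
      case pos =>
        by_cases hstar : pvGet2 b (y + v) (x + v * step) = "*"
        · have e1 := pv_fillA_eq_fillB y x step 1 v 1 b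
          rw [one_mul] at e1
          have hU : scanB (f+1) y x H W step 1 b v
              = fillB y x step 1 b (PySem.List.pyRange 1 v 1) := by
            rw [scanB]; simp only [reduceIte, one_mul]
            rw [if_pos (And.intro hc hH), if_pos hcU, if_pos hstar]
          rw [hU]
          have hg : pvGet2 (fillB y x step 1 b (PySem.List.pyRange 1 v 1)) (y - v) (x + v * step)
              = pvGet2 b (y - v) (x + v * step) := by
            apply pv_get2_fillB_ne
            intro k hk
            rw [PySem.List.mem_pyRange_one] at hk
            omega
          simp only [loopA, if_pos hc, and_true,
            if_pos (⟨hH, hcU⟩ : y + v < H ∧ pvGet2 b (y + v) (x + v * step) ≠ "."),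
            if_pos hstar, e1, hg]
          by_cases hD0 : 0 ≤ y - v
          · by_cases hcD : pvGet2 b (y - v) (x + v * step) ≠ "."
            · simp only [if_pos (⟨hD0, hcD⟩ :
                  0 ≤ y - v ∧ pvGet2 b (y - v) (x + v * step) ≠ ".")]
              rw [pv_loopA_ff, scanB]
              simp only [if_neg hneg1, neg_one_mul, hyv, hg]
              rw [if_pos (And.intro hc hD0), if_pos hcD]
              by_cases hstar2 : pvGet2 b (y - v) (x + v * step) = "*"
              · rw [if_pos hstar2, if_pos hstar2]
                have e2 := pv_fillA_eq_fillB y x step (-1) v 1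
                  (fillB y x step 1 b (PySem.List.pyRange 1 v 1))
                rw [one_mul] at e2
                exact e2
              · rw [if_neg hstar2, if_neg hstar2]
            · simp only [if_neg (show ¬(0 ≤ y - v ∧ pvGet2 b (y - v) (x + v * step) ≠ ".")
                from fun h => hcD h.2)]
              rw [e, pv_loopA_ft, scanB]
              simp only [if_neg hneg1, neg_one_mul, hyv, hg]
              rw [if_pos (And.intro hc hD0), if_neg hcD]
          · simp only [eq_false hD0, false_and, if_false]
            rw [e, pv_loopA_ft,
              pv_scanB_down_stop f y x H W step _ (v+1) (by omega), scanB]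
            simp only [if_neg hneg1, neg_one_mul, hyv]
            rw [if_neg (fun h => hD0 h.2)]
        · have hU : scanB (f+1) y x H W step 1 b v = b := by
            rw [scanB]; simp only [reduceIte, one_mul]
            rw [if_pos (And.intro hc hH), if_pos hcU, if_neg hstar]
          rw [hU]
          simp only [loopA, if_pos hc, and_true,
            if_pos (⟨hH, hcU⟩ : y + v < H ∧ pvGet2 b (y + v) (x + v * step) ≠ "."),
            if_neg hstar]
          by_cases hD0 : 0 ≤ y - v
          · by_cases hcD : pvGet2 b (y - v) (x + v * step) ≠ "."
            · simp only [if_pos (⟨hD0, hcD⟩ :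
                  0 ≤ y - v ∧ pvGet2 b (y - v) (x + v * step) ≠ ".")]
              rw [pv_loopA_ff, scanB]
              simp only [if_neg hneg1, neg_one_mul, hyv]
              rw [if_pos (And.intro hc hD0), if_pos hcD]
              by_cases hstar2 : pvGet2 b (y - v) (x + v * step) = "*"
              · rw [if_pos hstar2, if_pos hstar2]
                have e2 := pv_fillA_eq_fillB y x step (-1) v 1 b
                rw [one_mul] at e2
                exact e2
              · rw [if_neg hstar2, if_neg hstar2]
            · simp only [if_neg (show ¬(0 ≤ y - v ∧ pvGet2 b (y - v) (x + v * step) ≠ ".")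
                from fun h => hcD h.2)]
              rw [e, pv_loopA_ft, scanB]
              simp only [if_neg hneg1, neg_one_mul, hyv]
              rw [if_pos (And.intro hc hD0), if_neg hcD]
          · simp only [eq_false hD0, false_and, if_false]
            rw [e, pv_loopA_ft,
              pv_scanB_down_stop f y x H W step b (v+1) (by omega), scanB]
            simp only [if_neg hneg1, neg_one_mul, hyv]
            rw [if_neg (fun h => hD0 h.2)]
      case neg =>
        have hU : scanB (f+1) y x H W step 1 b v = scanB f y x H W step 1 b (v+1) := by
          rw [scanB]; simp only [reduceIte, one_mul]
          rw [if_pos (And.intro hc hH), if_neg hcU]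
        rw [hU]
        simp only [loopA, if_pos hc, and_true,
          if_neg (show ¬(y + v < H ∧ pvGet2 b (y + v) (x + v * step) ≠ ".")
            from fun h => hcU h.2)]
        by_cases hD0 : 0 ≤ y - v
        · have hg : pvGet2 (scanB f y x H W step 1 b (v+1)) (y - v) (x + v * step)
              = pvGet2 b (y - v) (x + v * step) :=
            pv_scanB_up_get_below y x H W step (y - v) (x + v * step) hD0 (by omega) f (v+1) b
              (by omega)
          by_cases hcD : pvGet2 b (y - v) (x + v * step) ≠ "."
          · simp only [if_pos (⟨hD0, hcD⟩ :
                0 ≤ y - v ∧ pvGet2 b (y - v) (x + v * step) ≠ ".")]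
            rw [e, pv_loopA_tf, scanB]
            simp only [if_neg hneg1, neg_one_mul, hyv, hg]
            rw [if_pos (And.intro hc hD0), if_pos hcD]
            by_cases hstar2 : pvGet2 b (y - v) (x + v * step) = "*"
            · rw [if_pos hstar2, if_pos hstar2]
              have e2 := pv_fillA_eq_fillB y x step (-1) v 1 b
              rw [one_mul] at e2
              rw [e2]
              exact pv_scanB_up_fillB_comm y x H W step (PySem.List.pyRange 1 v 1)
                (by intro k hk; rw [PySem.List.mem_pyRange_one] at hk; omega)
                f (v+1) b (by omega)
            · rw [if_neg hstar2, if_neg hstar2]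
          · simp only [if_neg (show ¬(0 ≤ y - v ∧ pvGet2 b (y - v) (x + v * step) ≠ ".")
              from fun h => hcD h.2)]
            rw [e, ih (v+1) b (by omega), scanB]
            simp only [if_neg hneg1, neg_one_mul, hyv, hg]
            rw [if_pos (And.intro hc hD0), if_neg hcD]
        · simp only [eq_false hD0, false_and, if_false]
          rw [e, ih (v+1) b (by omega),
            pv_scanB_down_stop f y x H W step _ (v+1) (by omega), scanB]
          simp only [if_neg hneg1, neg_one_mul, hyv]
          rw [if_neg (fun h => hD0 h.2)]

-- ===== VERDICT (by name: the statement is the Claim_ definition above) =====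
theorem change_diagonal_mark_spec : Claim_equal_change_diagonal_mark := by
  intro y x S_map H W d _hDom hPre
  unfold Spec_change_diagonal_mark
  simp only [change_diagonal_mark, change_diagonal_mark_alt, List.foldl_cons, List.foldl_nil]
  rcases hPre with ⟨hy, -, -, -⟩ | hx | ⟨h1, h2⟩
  · have h := pv_loopA_main y x H W (if d = "L" then -1 else 1) hy (W.toNat + 1) 1 S_map
      (le_refl 1)
    rw [one_mul] at h
    exact h
  · rw [loopA, if_neg hx]
    have hs1 : scanB (W.toNat + 1) y x H W (if d = "L" then -1 else 1) 1 S_map 1 = S_map := by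
      rw [scanB]
      simp only [reduceIte, one_mul]
      rw [if_neg (fun h => hx h.1)]
    rw [hs1, scanB]
    simp only [if_neg (show ¬((-1:Int) = 1) from by decide), one_mul]
    rw [if_neg (fun h => hx h.1)]
  · rw [pv_loopA_up_dead y x H W (if d = "L" then -1 else 1) (W.toNat + 1) 1 _ S_map true
      (by omega),
      pv_loopA_down_dead y x H W (if d = "L" then -1 else 1) (W.toNat + 1) 1 _ S_map false
      (by omega),
      pv_loopA_ff,
      pv_scanB_up_stop (W.toNat + 1) y x H W (if d = "L" then -1 else 1) S_map 1 (by omega),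
      pv_scanB_down_stop (W.toNat + 1) y x H W (if d = "L" then -1 else 1) S_map 1 (by omega)]
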